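-- pv_equiv track=rewrite | github.com/need-singularity/n6-architecture | domains/sedi/sedi/sources/egyptian_fraction.py | find_unit_fraction_triples
-- ===== SOURCE A (Python) =====
-- def find_unit_fraction_triples(max_denom=200):
--     """Find all (a, b, c) with 2 <= a <= b <= c and 1/a+1/b+1/c = 1."""
--     from fractions import Fraction
--     solutions = []
--     one = Fraction(1, 1)
--     for a in range(2, max_denom + 1):
--         fa = Fraction(1, a)
--         if 3 * fa < one:
--             # Even 1/a + 1/a + 1/a < 1, so a is too large
--             break
--         for b in range(a, max_denom + 1):
--             fb = Fraction(1, b)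
--             remainder = one - fa - fb
--             if remainder < 0:
--                 # 1/a + 1/b > 1; as b grows 1/b shrinks so remainder grows
--                 # → for small b, remainder can be negative; skip and try larger b
--                 continue
--             if remainder == 0:
--                 # 1/a + 1/b = 1 exactly, no room for 1/c > 0
--                 continue
--             # Now remainder > 0. Need remainder = 1/c with c integer, c >= b
--             if remainder.numerator == 1 and remainder.denominator >= b:
--                 c = remainder.denominator
--                 if c <= max_denom:
--                     solutions.append((a, b, c))
--             # If remainder < 1/max_denom, c would exceed max_denom; stop
--             if remainder < Fraction(1, max_denom):
--                 break
--     return solutions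
-- ===== SOURCE B (Python) =====
-- def find_unit_fraction_triples(max_denom=200):
--     """Find all (a, b, c) with 2 <= a <= b <= c <= max_denom and 1/a+1/b+1/c = 1.
--
--     Number-theoretic: a <= 3 is forced; for each a, 1/b + 1/c = (a-1)/a, and
--     with p = a-1, q = a the identity (p*b - q)*(p*c - q) = q*q reduces the
--     search to divisor pairs of q*q.  O(1) work overall, no Fraction loop.
--     """
--     solutions = []
--     for a in range(2, min(max_denom, 3) + 1):
--         p, q = a - 1, a  # 1/b + 1/c = p/q with gcd(p, q) = 1
--         for d in range(1, q + 1):  # d = p*b - q, the smaller divisor of q*q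
--             if (q * q) % d != 0:
--                 continue
--             e = (q * q) // d
--             if (d + q) % p != 0 or (e + q) % p != 0:
--                 continue
--             b = (d + q) // p
--             c = (e + q) // p
--             if a <= b and c <= max_denom:
--                 solutions.append((a, b, c))
--     return solutions
-- ===== Notes on version B (the rewrite author's own statement) =====
-- stated objective: faster
-- what changed: Replaces the Fraction-based scan of all b up to max_denom with a number-theoretic enumeration of divisor pairs of a^2 via the identity ((a-1)b-a)((a-1)c-a)=a^2, doing O(1) work instead of O(max_denom) Fraction operations.
-- intended difference: For max_denom = 4 or 5, A's early break (taken when remainder < 1/max_denom at b=3, before larger b are tried) wrongly skips (2,4,4), so A returns [(3,3,3)] while B returns [(2,4,4),(3,3,3)]; B's value is intended since 1/2+1/4+1/4=1 with all denominators <= max_denom. — e.g. on find_unit_fraction_triples(4): A returns [(3, 3, 3)], B returns [(2, 4, 4), (3, 3, 3)]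
import Mathlib
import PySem

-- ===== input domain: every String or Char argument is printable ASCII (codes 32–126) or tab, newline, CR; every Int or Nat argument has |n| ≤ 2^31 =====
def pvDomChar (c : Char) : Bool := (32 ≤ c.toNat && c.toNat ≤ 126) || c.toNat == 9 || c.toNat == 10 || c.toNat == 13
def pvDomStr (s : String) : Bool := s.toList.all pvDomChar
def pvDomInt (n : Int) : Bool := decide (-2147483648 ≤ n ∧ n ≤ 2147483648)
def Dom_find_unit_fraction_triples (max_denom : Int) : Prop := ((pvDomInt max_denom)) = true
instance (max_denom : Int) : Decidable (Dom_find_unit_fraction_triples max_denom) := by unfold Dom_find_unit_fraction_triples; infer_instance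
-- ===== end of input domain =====

-- B replaces A's O(max_denom) Fraction-based scan by an O(1) divisor-pair enumeration
-- via the identity ((a-1)b-a)((a-1)c-a) = a^2 (objective: faster), and is intendedly
-- different from A on max_denom ∈ {4,5} (A's premature break; see D_ below).

-- ===== PORT A =====
-- Python's Fraction is ported as Lean's Rat (both are reduced rationals with positive
-- denominator, so .num/.den match Fraction.numerator/denominator exactly).
-- Inner b-loop of A, with `continue` and `break` as in the Python.
def pvInnerA (max_denom a : Int) (sols : List (Int × Int × Int)) :
    List Int → List (Int × Int × Int)
  | [] => sols
  | b :: rest =>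
    let fa : Rat := 1 / (a : Rat)
    let fb : Rat := 1 / (b : Rat)
    let remainder : Rat := 1 - fa - fb
    if remainder < 0 then pvInnerA max_denom a sols rest          -- continue
    else if remainder = 0 then pvInnerA max_denom a sols rest     -- continue
    else
      let sols' :=
        if remainder.num = 1 ∧ b ≤ (remainder.den : Int) then
          if (remainder.den : Int) ≤ max_denom then sols ++ [(a, b, (remainder.den : Int))]
          else sols
        else sols
      if remainder < 1 / (max_denom : Rat) then sols'             -- break
      else pvInnerA max_denom a sols' rest

-- Outer a-loop of A, with its `break`.
def pvOuterA (max_denom : Int) (sols : List (Int × Int × Int)) :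
    List Int → List (Int × Int × Int)
  | [] => sols
  | a :: rest =>
    let fa : Rat := 1 / (a : Rat)
    if 3 * fa < 1 then sols                                       -- break
    else pvOuterA max_denom
      (pvInnerA max_denom a sols (PySem.List.pyRange a (max_denom + 1) 1)) rest

def find_unit_fraction_triples (max_denom : Int) : List (Int × Int × Int) :=
  pvOuterA max_denom [] (PySem.List.pyRange 2 (max_denom + 1) 1)

-- ===== PORT B =====
def find_unit_fraction_triples_alt (max_denom : Int) : List (Int × Int × Int) :=
  (PySem.List.pyRange 2 (min max_denom 3 + 1) 1).foldl (fun sols a =>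
    let p := a - 1
    let q := a
    (PySem.List.pyRange 1 (q + 1) 1).foldl (fun sols d =>
      if PySem.Int.mod (q * q) d ≠ 0 then sols
      else
        let e := PySem.Int.floordiv (q * q) d
        if PySem.Int.mod (d + q) p ≠ 0 ∨ PySem.Int.mod (e + q) p ≠ 0 then sols
        else
          let b := PySem.Int.floordiv (d + q) p
          let c := PySem.Int.floordiv (e + q) p
          if a ≤ b ∧ c ≤ max_denom then sols ++ [(a, b, c)] else sols) sols) []

-- ===== PRECONDITION & SPEC =====
-- For max_denom = 4 or 5, A's early break (taken at b = 3 because remainder < 1/max_denom,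
-- before larger b are tried) wrongly skips (2,4,4), so A returns [(3,3,3)] while B returns
-- [(2,4,4),(3,3,3)]; B's value is intended since 1/2+1/4+1/4 = 1 with all denominators ≤ max_denom.
def D_find_unit_fraction_triples (max_denom : Int) : Prop := max_denom = 4 ∨ max_denom = 5
instance (max_denom : Int) : Decidable (D_find_unit_fraction_triples max_denom) := by
  unfold D_find_unit_fraction_triples; infer_instance

def Spec_find_unit_fraction_triples (max_denom : Int) (out : List (Int × Int × Int)) : Prop :=
  ¬ D_find_unit_fraction_triples max_denom → out = find_unit_fraction_triples_alt max_denom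
instance (max_denom : Int) (out : List (Int × Int × Int)) :
    Decidable (Spec_find_unit_fraction_triples max_denom out) := by
  unfold Spec_find_unit_fraction_triples; infer_instance

def pvDiffWitness_find_unit_fraction_triples : Int := 4
def pvDiffWitnessOut_find_unit_fraction_triples :
    (List (Int × Int × Int)) × (List (Int × Int × Int)) :=
  ([(3, 3, 3)], [(2, 4, 4), (3, 3, 3)])

-- ===== CLAIM =====
def Claim_unchanged_find_unit_fraction_triples : Prop := ∀ (max_denom : Int), Dom_find_unit_fraction_triples max_denom → Spec_find_unit_fraction_triples max_denom (find_unit_fraction_triples max_denom)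
def Claim_changed_find_unit_fraction_triples : Prop := Dom_find_unit_fraction_triples (pvDiffWitness_find_unit_fraction_triples) ∧ D_find_unit_fraction_triples (pvDiffWitness_find_unit_fraction_triples) ∧ find_unit_fraction_triples (pvDiffWitness_find_unit_fraction_triples) = pvDiffWitnessOut_find_unit_fraction_triples.1 ∧ find_unit_fraction_triples_alt (pvDiffWitness_find_unit_fraction_triples) = pvDiffWitnessOut_find_unit_fraction_triples.2 ∧ pvDiffWitnessOut_find_unit_fraction_triples.1 ≠ pvDiffWitnessOut_find_unit_fraction_triples.2
def Claim_exact_find_unit_fraction_triples : Prop := ∀ (max_denom : Int), Dom_find_unit_fraction_triples max_denom → D_find_unit_fraction_triples max_denom → find_unit_fraction_triples max_denom ≠ find_unit_fraction_triples_alt max_denom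

-- ===== LEMMAS AND PROOFS =====

-- One unfolding step of the inner loop, with the `let`s expanded.
lemma pvInnerA_cons (md a b : Int) (sols : List (Int × Int × Int)) (l : List Int) :
    pvInnerA md a sols (b :: l) =
      if (1 - 1 / ((a : Int) : Rat) - 1 / ((b : Int) : Rat)) < 0 then pvInnerA md a sols l
      else if (1 - 1 / ((a : Int) : Rat) - 1 / ((b : Int) : Rat)) = 0 then pvInnerA md a sols l
      else
        if (1 - 1 / ((a : Int) : Rat) - 1 / ((b : Int) : Rat)) < 1 / ((md : Int) : Rat) then
          (if (1 - 1 / ((a : Int) : Rat) - 1 / ((b : Int) : Rat)).num = 1 ∧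
              b ≤ ((1 - 1 / ((a : Int) : Rat) - 1 / ((b : Int) : Rat)).den : Int) then
            if ((1 - 1 / ((a : Int) : Rat) - 1 / ((b : Int) : Rat)).den : Int) ≤ md then
              sols ++ [(a, b, ((1 - 1 / ((a : Int) : Rat) - 1 / ((b : Int) : Rat)).den : Int))]
            else sols
          else sols)
        else pvInnerA md a
          (if (1 - 1 / ((a : Int) : Rat) - 1 / ((b : Int) : Rat)).num = 1 ∧
              b ≤ ((1 - 1 / ((a : Int) : Rat) - 1 / ((b : Int) : Rat)).den : Int) then
            if ((1 - 1 / ((a : Int) : Rat) - 1 / ((b : Int) : Rat)).den : Int) ≤ md then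
              sols ++ [(a, b, ((1 - 1 / ((a : Int) : Rat) - 1 / ((b : Int) : Rat)).den : Int))]
            else sols
          else sols) l := rfl

-- One unfolding step of the outer loop.
lemma pvOuterA_cons (md a : Int) (sols : List (Int × Int × Int)) (l : List Int) :
    pvOuterA md sols (a :: l) =
      if 3 * (1 / ((a : Int) : Rat)) < 1 then sols
      else pvOuterA md (pvInnerA md a sols (PySem.List.pyRange a (md + 1) 1)) l := rfl

-- a = 2, b = 2 : remainder 0, `continue`.
lemma pvStep22 (md : Int) (sols : List (Int × Int × Int)) (l : List Int) :
    pvInnerA md 2 sols (2 :: l) = pvInnerA md 2 sols l := by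
  rw [pvInnerA_cons]; norm_num

-- a = 2, b = 3, md ≥ 6 : remainder 1/6, append (2,3,6), no break.
lemma pvStep23_ge6 (md : Int) (hmd : (6:Int) ≤ md) (sols : List (Int × Int × Int)) (l : List Int) :
    pvInnerA md 2 sols (3 :: l) = pvInnerA md 2 (sols ++ [(2, 3, 6)]) l := by
  rw [pvInnerA_cons]
  have e : (1:Rat) - 1 / ((2 : Int) : Rat) - 1 / ((3 : Int) : Rat) = mkRat 1 6 := by
    rw [Rat.mkRat_eq_div]; norm_num
  rw [e]
  have hmdQ : (6 : Rat) ≤ ((md : Int) : Rat) := by exact_mod_cast hmd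
  have hmdinv : (1 : Rat) / ((md : Int) : Rat) ≤ 1 / 6 :=
    one_div_le_one_div_of_le (by norm_num) hmdQ
  have e6 : (mkRat 1 6 : Rat) = 1 / 6 := by rw [Rat.mkRat_eq_div]; norm_num
  rw [if_neg (by rw [e6]; norm_num), if_neg (by rw [e6]; norm_num),
      if_neg (by rw [e6]; linarith),
      if_pos ⟨by decide, by rw [show (((mkRat 1 6).den) : Int) = 6 from by decide]; norm_num⟩,
      if_pos (by rw [show (((mkRat 1 6).den) : Int) = 6 from by decide]; exact hmd),
      show (((mkRat 1 6).den) : Int) = 6 from by decide]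

-- a = 2, b = 3, 1 ≤ md ≤ 5 : remainder 1/6 gives no triple (6 > md) and the loop breaks.
lemma pvStep23_lt6 (md : Int) (h1 : (1:Int) ≤ md) (h5 : md ≤ 5)
    (sols : List (Int × Int × Int)) (l : List Int) :
    pvInnerA md 2 sols (3 :: l) = sols := by
  rw [pvInnerA_cons]
  have e : (1:Rat) - 1 / ((2 : Int) : Rat) - 1 / ((3 : Int) : Rat) = mkRat 1 6 := by
    rw [Rat.mkRat_eq_div]; norm_num
  rw [e]
  have e6 : (mkRat 1 6 : Rat) = 1 / 6 := by rw [Rat.mkRat_eq_div]; norm_num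
  have hmdQ : ((md : Int) : Rat) ≤ 5 := by exact_mod_cast h5
  have hmd1 : (1 : Rat) ≤ ((md : Int) : Rat) := by exact_mod_cast h1
  have hbrk : (mkRat 1 6 : Rat) < 1 / ((md : Int) : Rat) := by
    rw [e6]
    have : (1:Rat) / 5 ≤ 1 / ((md : Int) : Rat) :=
      one_div_le_one_div_of_le (by linarith) hmdQ
    linarith
  rw [if_neg (by rw [e6]; norm_num), if_neg (by rw [e6]; norm_num), if_pos hbrk,
      if_pos ⟨by decide, by rw [show (((mkRat 1 6).den) : Int) = 6 from by decide]; norm_num⟩,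
      if_neg (by rw [show (((mkRat 1 6).den) : Int) = 6 from by decide]; omega)]

-- a = 2, b = 4, md ≥ 6 : remainder 1/4, append (2,4,4), no break.
lemma pvStep24_ge6 (md : Int) (hmd : (6:Int) ≤ md) (sols : List (Int × Int × Int)) (l : List Int) :
    pvInnerA md 2 sols (4 :: l) = pvInnerA md 2 (sols ++ [(2, 4, 4)]) l := by
  rw [pvInnerA_cons]
  have e : (1:Rat) - 1 / ((2 : Int) : Rat) - 1 / ((4 : Int) : Rat) = mkRat 1 4 := by
    rw [Rat.mkRat_eq_div]; norm_num
  rw [e]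
  have e4 : (mkRat 1 4 : Rat) = 1 / 4 := by rw [Rat.mkRat_eq_div]; norm_num
  have hmdQ : (6 : Rat) ≤ ((md : Int) : Rat) := by exact_mod_cast hmd
  have hmdinv : (1 : Rat) / ((md : Int) : Rat) ≤ 1 / 6 :=
    one_div_le_one_div_of_le (by norm_num) hmdQ
  rw [if_neg (by rw [e4]; norm_num), if_neg (by rw [e4]; norm_num),
      if_neg (by rw [e4]; linarith),
      if_pos ⟨by decide, by rw [show (((mkRat 1 4).den) : Int) = 4 from by decide]⟩,
      if_pos (by rw [show (((mkRat 1 4).den) : Int) = 4 from by decide]; omega),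
      show (((mkRat 1 4).den) : Int) = 4 from by decide]

-- a = 3, b = 3, md ≥ 3 : remainder 1/3, append (3,3,3), no break.
lemma pvStep33 (md : Int) (hmd : (3:Int) ≤ md) (sols : List (Int × Int × Int)) (l : List Int) :
    pvInnerA md 3 sols (3 :: l) = pvInnerA md 3 (sols ++ [(3, 3, 3)]) l := by
  rw [pvInnerA_cons]
  have e : (1:Rat) - 1 / ((3 : Int) : Rat) - 1 / ((3 : Int) : Rat) = mkRat 1 3 := by
    rw [Rat.mkRat_eq_div]; norm_num
  rw [e]
  have e3 : (mkRat 1 3 : Rat) = 1 / 3 := by rw [Rat.mkRat_eq_div]; norm_num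
  have hmdQ : (3 : Rat) ≤ ((md : Int) : Rat) := by exact_mod_cast hmd
  have hmdinv : (1 : Rat) / ((md : Int) : Rat) ≤ 1 / 3 :=
    one_div_le_one_div_of_le (by norm_num) hmdQ
  rw [if_neg (by rw [e3]; norm_num), if_neg (by rw [e3]; norm_num),
      if_neg (by rw [e3]; linarith),
      if_pos ⟨by decide, by rw [show (((mkRat 1 3).den) : Int) = 3 from by decide]⟩,
      if_pos (by rw [show (((mkRat 1 3).den) : Int) = 3 from by decide]; exact hmd),
      show (((mkRat 1 3).den) : Int) = 3 from by decide]

-- a = 3, b = 4, md ≥ 4 : remainder 5/12, not a unit fraction, no break.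
lemma pvStep34 (md : Int) (hmd : (4:Int) ≤ md) (sols : List (Int × Int × Int)) (l : List Int) :
    pvInnerA md 3 sols (4 :: l) = pvInnerA md 3 sols l := by
  rw [pvInnerA_cons]
  have e : (1:Rat) - 1 / ((3 : Int) : Rat) - 1 / ((4 : Int) : Rat) = mkRat 5 12 := by
    rw [Rat.mkRat_eq_div]; norm_num
  rw [e]
  have e512 : (mkRat 5 12 : Rat) = 5 / 12 := by rw [Rat.mkRat_eq_div]; norm_num
  have hmdQ : (4 : Rat) ≤ ((md : Int) : Rat) := by exact_mod_cast hmd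
  have hmdinv : (1 : Rat) / ((md : Int) : Rat) ≤ 1 / 4 :=
    one_div_le_one_div_of_le (by norm_num) hmdQ
  rw [if_neg (by rw [e512]; norm_num), if_neg (by rw [e512]; norm_num),
      if_neg (by rw [e512]; linarith), if_neg (by rintro ⟨h1, -⟩; revert h1; decide)]

-- a = 3, b = 5, md ≥ 5 : remainder 7/15, not a unit fraction, no break.
lemma pvStep35 (md : Int) (hmd : (5:Int) ≤ md) (sols : List (Int × Int × Int)) (l : List Int) :
    pvInnerA md 3 sols (5 :: l) = pvInnerA md 3 sols l := by
  rw [pvInnerA_cons]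
  have e : (1:Rat) - 1 / ((3 : Int) : Rat) - 1 / ((5 : Int) : Rat) = mkRat 7 15 := by
    rw [Rat.mkRat_eq_div]; norm_num
  rw [e]
  have e715 : (mkRat 7 15 : Rat) = 7 / 15 := by rw [Rat.mkRat_eq_div]; norm_num
  have hmdQ : (5 : Rat) ≤ ((md : Int) : Rat) := by exact_mod_cast hmd
  have hmdinv : (1 : Rat) / ((md : Int) : Rat) ≤ 1 / 5 :=
    one_div_le_one_div_of_le (by norm_num) hmdQ
  rw [if_neg (by rw [e715]; norm_num), if_neg (by rw [e715]; norm_num),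
      if_neg (by rw [e715]; linarith), if_neg (by rintro ⟨h1, -⟩; revert h1; decide)]

-- Once b ≥ 5 (for a = 2), the remainder 1/2 - 1/b is ≥ 3/10: positive, never a unit
-- fraction 1/c with c ≥ b, and never below 1/max_denom when max_denom ≥ 6.
lemma pvInnerA2_tail (md : Int) (hmd : (6 : Int) ≤ md) (l : List Int)
    (hl : ∀ x ∈ l, (5 : Int) ≤ x) (sols : List (Int × Int × Int)) :
    pvInnerA md 2 sols l = sols := by
  induction l generalizing sols with
  | nil => rfl
  | cons b rest ih =>
    have hb : (5 : Int) ≤ b := hl b (List.mem_cons_self)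
    have hrest : ∀ x ∈ rest, (5 : Int) ≤ x := fun x hx => hl x (List.mem_cons_of_mem _ hx)
    have hbQ : (5 : Rat) ≤ ((b : Int) : Rat) := by exact_mod_cast hb
    have hb0 : (0 : Rat) < ((b : Int) : Rat) := by linarith
    have hinv : (1 : Rat) / ((b : Int) : Rat) ≤ 1 / 5 :=
      one_div_le_one_div_of_le (by norm_num) hbQ
    have hmdQ : (6 : Rat) ≤ ((md : Int) : Rat) := by exact_mod_cast hmd
    have hmdinv : (1 : Rat) / ((md : Int) : Rat) ≤ 1 / 6 :=
      one_div_le_one_div_of_le (by norm_num) hmdQ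
    have hrlb : (3 : Rat) / 10 ≤ 1 - 1 / ((2 : Int) : Rat) - 1 / ((b : Int) : Rat) := by
      push_cast; linarith
    have hc1 : ¬ ((1:Rat) - 1 / ((2 : Int) : Rat) - 1 / ((b : Int) : Rat) < 0) := by linarith
    have hc2 : ¬ ((1:Rat) - 1 / ((2 : Int) : Rat) - 1 / ((b : Int) : Rat) = 0) := by
      intro h; rw [h] at hrlb; linarith
    have hc3 : ¬ (((1:Rat) - 1 / ((2 : Int) : Rat) - 1 / ((b : Int) : Rat)).num = 1 ∧
        b ≤ (((1:Rat) - 1 / ((2 : Int) : Rat) - 1 / ((b : Int) : Rat)).den : Int)) := by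
      rintro ⟨h1, h2⟩
      set r : Rat := 1 - 1 / ((2 : Int) : Rat) - 1 / ((b : Int) : Rat) with hr
      have hle : r ≤ 1 / ((b : Int) : Rat) := by
        have hrval := Rat.num_div_den r
        rw [h1] at hrval
        push_cast at hrval
        rw [← hrval]
        apply one_div_le_one_div_of_le hb0
        exact_mod_cast h2
      linarith
    have hc4 : ¬ ((1:Rat) - 1 / ((2 : Int) : Rat) - 1 / ((b : Int) : Rat)
        < 1 / ((md : Int) : Rat)) := by linarith
    rw [pvInnerA_cons, if_neg hc1, if_neg hc2, if_neg hc3, if_neg hc4]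
    exact ih hrest sols

-- Once b ≥ 4 (for a = 3), the remainder 2/3 - 1/b is ≥ 5/12: same three facts.
lemma pvInnerA3_tail (md : Int) (hmd : (6 : Int) ≤ md) (l : List Int)
    (hl : ∀ x ∈ l, (4 : Int) ≤ x) (sols : List (Int × Int × Int)) :
    pvInnerA md 3 sols l = sols := by
  induction l generalizing sols with
  | nil => rfl
  | cons b rest ih =>
    have hb : (4 : Int) ≤ b := hl b (List.mem_cons_self)
    have hrest : ∀ x ∈ rest, (4 : Int) ≤ x := fun x hx => hl x (List.mem_cons_of_mem _ hx)
    have hbQ : (4 : Rat) ≤ ((b : Int) : Rat) := by exact_mod_cast hb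
    have hb0 : (0 : Rat) < ((b : Int) : Rat) := by linarith
    have hinv : (1 : Rat) / ((b : Int) : Rat) ≤ 1 / 4 :=
      one_div_le_one_div_of_le (by norm_num) hbQ
    have hmdQ : (6 : Rat) ≤ ((md : Int) : Rat) := by exact_mod_cast hmd
    have hmdinv : (1 : Rat) / ((md : Int) : Rat) ≤ 1 / 6 :=
      one_div_le_one_div_of_le (by norm_num) hmdQ
    have hrlb : (5 : Rat) / 12 ≤ 1 - 1 / ((3 : Int) : Rat) - 1 / ((b : Int) : Rat) := by
      push_cast; linarith
    have hc1 : ¬ ((1:Rat) - 1 / ((3 : Int) : Rat) - 1 / ((b : Int) : Rat) < 0) := by linarith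
    have hc2 : ¬ ((1:Rat) - 1 / ((3 : Int) : Rat) - 1 / ((b : Int) : Rat) = 0) := by
      intro h; rw [h] at hrlb; linarith
    have hc3 : ¬ (((1:Rat) - 1 / ((3 : Int) : Rat) - 1 / ((b : Int) : Rat)).num = 1 ∧
        b ≤ (((1:Rat) - 1 / ((3 : Int) : Rat) - 1 / ((b : Int) : Rat)).den : Int)) := by
      rintro ⟨h1, h2⟩
      set r : Rat := 1 - 1 / ((3 : Int) : Rat) - 1 / ((b : Int) : Rat) with hr
      have hle : r ≤ 1 / ((b : Int) : Rat) := by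
        have hrval := Rat.num_div_den r
        rw [h1] at hrval
        push_cast at hrval
        rw [← hrval]
        apply one_div_le_one_div_of_le hb0
        exact_mod_cast h2
      linarith
    have hc4 : ¬ ((1:Rat) - 1 / ((3 : Int) : Rat) - 1 / ((b : Int) : Rat)
        < 1 / ((md : Int) : Rat)) := by linarith
    rw [pvInnerA_cons, if_neg hc1, if_neg hc2, if_neg hc3, if_neg hc4]
    exact ih hrest sols

-- Outer-loop steps: a = 2 and a = 3 do not break, a = 4 breaks.
lemma pvOuter2 (md : Int) (sols : List (Int × Int × Int)) (l : List Int) :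
    pvOuterA md sols (2 :: l) =
      pvOuterA md (pvInnerA md 2 sols (PySem.List.pyRange 2 (md + 1) 1)) l := by
  rw [pvOuterA_cons, if_neg (by norm_num)]

lemma pvOuter3 (md : Int) (sols : List (Int × Int × Int)) (l : List Int) :
    pvOuterA md sols (3 :: l) =
      pvOuterA md (pvInnerA md 3 sols (PySem.List.pyRange 3 (md + 1) 1)) l := by
  rw [pvOuterA_cons, if_neg (by norm_num)]

lemma pvOuter4 (md : Int) (sols : List (Int × Int × Int)) (l : List Int) :
    pvOuterA md sols (4 :: l) = sols := by
  rw [pvOuterA_cons, if_pos (by norm_num)]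

-- Values of A on each region of max_denom.
lemma findA_le1 (md : Int) (hmd : md ≤ 1) : find_unit_fraction_triples md = [] := by
  unfold find_unit_fraction_triples
  rw [PySem.List.pyRange_one_eq_nil (by omega)]
  rfl

lemma findA_2 : find_unit_fraction_triples 2 = [] := by
  unfold find_unit_fraction_triples
  rw [show PySem.List.pyRange 2 (2 + 1) 1 = [2] from by decide, pvOuter2,
      show PySem.List.pyRange 2 (2 + 1) 1 = [2] from by decide, pvStep22]
  rfl

lemma findA_3 : find_unit_fraction_triples 3 = [(3, 3, 3)] := by
  unfold find_unit_fraction_triples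
  rw [show PySem.List.pyRange 2 (3 + 1) 1 = [2, 3] from by decide, pvOuter2,
      show PySem.List.pyRange 2 (3 + 1) 1 = [2, 3] from by decide, pvStep22,
      pvStep23_lt6 3 (by norm_num) (by norm_num), pvOuter3,
      show PySem.List.pyRange 3 (3 + 1) 1 = [3] from by decide,
      pvStep33 3 (by norm_num)]
  rfl

lemma findA_4 : find_unit_fraction_triples 4 = [(3, 3, 3)] := by
  unfold find_unit_fraction_triples
  rw [show PySem.List.pyRange 2 (4 + 1) 1 = [2, 3, 4] from by decide, pvOuter2,
      show PySem.List.pyRange 2 (4 + 1) 1 = [2, 3, 4] from by decide, pvStep22,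
      pvStep23_lt6 4 (by norm_num) (by norm_num), pvOuter3,
      show PySem.List.pyRange 3 (4 + 1) 1 = [3, 4] from by decide,
      pvStep33 4 (by norm_num), pvStep34 4 (by norm_num), pvOuter4]
  rfl

lemma findA_5 : find_unit_fraction_triples 5 = [(3, 3, 3)] := by
  unfold find_unit_fraction_triples
  rw [show PySem.List.pyRange 2 (5 + 1) 1 = [2, 3, 4, 5] from by decide, pvOuter2,
      show PySem.List.pyRange 2 (5 + 1) 1 = [2, 3, 4, 5] from by decide, pvStep22,
      pvStep23_lt6 5 (by norm_num) (by norm_num), pvOuter3,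
      show PySem.List.pyRange 3 (5 + 1) 1 = [3, 4, 5] from by decide,
      pvStep33 5 (by norm_num), pvStep34 5 (by norm_num), pvStep35 5 (by norm_num), pvOuter4]
  rfl

lemma findA_ge6 (md : Int) (hmd : (6 : Int) ≤ md) :
    find_unit_fraction_triples md = [(2, 3, 6), (2, 4, 4), (3, 3, 3)] := by
  unfold find_unit_fraction_triples
  have hr2 : PySem.List.pyRange 2 (md + 1) 1
      = 2 :: 3 :: 4 :: PySem.List.pyRange 5 (md + 1) 1 := by
    rw [PySem.List.pyRange_one_cons (by omega), PySem.List.pyRange_one_cons (by omega),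
        PySem.List.pyRange_one_cons (by omega)]
    norm_num
  have hr3 : PySem.List.pyRange 3 (md + 1) 1 = 3 :: PySem.List.pyRange 4 (md + 1) 1 := by
    rw [PySem.List.pyRange_one_cons (by omega)]
    norm_num
  have htail5 : ∀ x ∈ PySem.List.pyRange 5 (md + 1) 1, (5 : Int) ≤ x := by
    intro x hx; rw [PySem.List.mem_pyRange_one] at hx; omega
  have htail4 : ∀ x ∈ PySem.List.pyRange 4 (md + 1) 1, (4 : Int) ≤ x := by
    intro x hx; rw [PySem.List.mem_pyRange_one] at hx; omega
  rw [hr2, pvOuter2, hr2, pvStep22, pvStep23_ge6 md hmd, pvStep24_ge6 md hmd,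
      pvInnerA2_tail md hmd _ htail5, pvOuter3, hr3, pvStep33 md (by omega),
      pvInnerA3_tail md hmd _ htail4, pvOuter4]
  rfl

-- Values of B on each region of max_denom.
lemma findB_le1 (md : Int) (hmd : md ≤ 1) : find_unit_fraction_triples_alt md = [] := by
  unfold find_unit_fraction_triples_alt
  rw [show min md 3 = md from by omega, PySem.List.pyRange_one_eq_nil (by omega)]
  rfl

lemma findB_2 : find_unit_fraction_triples_alt 2 = [] := by decide

lemma findB_ge3 (md : Int) (h : (3:Int) ≤ md) :
    find_unit_fraction_triples_alt md =
      (if (6:Int) ≤ md then [((2:Int), (3:Int), (6:Int))] else []) ++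
      (if (4:Int) ≤ md then [((2:Int), (4:Int), (4:Int))] else []) ++ [(3, 3, 3)] := by
  unfold find_unit_fraction_triples_alt
  rw [show min md 3 = 3 from by omega]
  norm_num [show PySem.List.pyRange 2 4 1 = [2, 3] from by decide,
    show PySem.List.pyRange 1 3 1 = [1, 2] from by decide,
    show PySem.List.pyRange 1 4 1 = [1, 2, 3] from by decide,
    PySem.Int.mod, PySem.Int.floordiv,
    show Int.fmod 9 3 = 0 from by decide, show Int.fdiv 9 3 = 3 from by decide,
    show Int.fmod 6 2 = 0 from by decide, show Int.fdiv 6 2 = 3 from by decide,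
    show Int.fmod 9 2 = 1 from by decide, show Int.fmod 4 2 = 0 from by decide,
    show Int.fmod 12 2 = 0 from by decide, show Int.fdiv 4 2 = 2 from by decide,
    show Int.fdiv 12 2 = 6 from by decide, h]
  split_ifs <;> simp

-- ===== VERDICT =====
theorem find_unit_fraction_triples_spec : Claim_unchanged_find_unit_fraction_triples := by
  intro md _ hnD
  have : md ≤ 1 ∨ md = 2 ∨ md = 3 ∨ md = 4 ∨ md = 5 ∨ 6 ≤ md := by omega
  rcases this with h | h | h | h | h | h
  · rw [findA_le1 md h, findB_le1 md h]
  · rw [h, findA_2, findB_2]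
  · rw [h, findA_3, findB_ge3 3 (by norm_num)]; norm_num
  · exact absurd (Or.inl h) hnD
  · exact absurd (Or.inr h) hnD
  · rw [findA_ge6 md h, findB_ge3 md (by omega), if_pos h, if_pos (by omega : (4:Int) ≤ md)]
    rfl

theorem find_unit_fraction_triples_changed : Claim_changed_find_unit_fraction_triples := by
  unfold Claim_changed_find_unit_fraction_triples
  refine ⟨by decide, Or.inl rfl, findA_4, ?_, by decide⟩
  rw [show pvDiffWitness_find_unit_fraction_triples = 4 from rfl, findB_ge3 4 (by norm_num)]
  rfl

theorem find_unit_fraction_triples_tight : Claim_exact_find_unit_fraction_triples := by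
  intro md _ hD
  rcases hD with h | h
  · rw [h, findA_4, findB_ge3 4 (by norm_num)]; norm_num
  · rw [h, findA_5, findB_ge3 5 (by norm_num)]; norm_num
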